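-- pv_equiv track=rewrite | github.com/eoruadl/codingAlgorithm | Programmers/levelTest/3진법 뒤집기.py | solution
-- ===== SOURCE A (Python) =====
-- def solution(n):
--     answer = 0
--     three = ""
--     while n > 0:
--         n, r = divmod(n, 3)
--         three = three + str(r)
--     revThree = three[::-1]
--     for i in range(len(three) - 1, -1, -1):
--         answer += 3 ** i * int(revThree[i])
--
--     return answer
-- ===== SOURCE B (Python) =====
-- def solution(n):
--     answer = 0
--     while n > 0:
--         n, r = divmod(n, 3)
--         answer = answer * 3 + r
--     return answer
-- ===== Notes on version B (the rewrite author's own statement) =====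
-- stated objective: simpler
-- what changed: Replaces A's build-digit-string / reverse-the-string / second pass summing 3**i * int(revThree[i]) with a single Horner accumulator loop (answer = answer*3 + r per extracted digit), eliminating the intermediate string, the reversal and the whole power-weighted summation pass.
import Mathlib
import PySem

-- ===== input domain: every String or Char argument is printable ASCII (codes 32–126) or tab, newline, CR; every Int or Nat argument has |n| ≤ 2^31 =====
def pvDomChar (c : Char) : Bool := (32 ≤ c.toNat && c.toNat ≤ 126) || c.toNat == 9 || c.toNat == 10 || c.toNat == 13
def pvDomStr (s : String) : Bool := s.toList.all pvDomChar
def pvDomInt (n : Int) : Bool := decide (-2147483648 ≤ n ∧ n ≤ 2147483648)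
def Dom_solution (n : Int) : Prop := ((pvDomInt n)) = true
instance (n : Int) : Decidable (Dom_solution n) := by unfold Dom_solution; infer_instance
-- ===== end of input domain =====

-- B changes: one Horner accumulator loop instead of A's digit string + reversal + powers-of-3 summation pass (objective: simpler).

-- ===== PORT A =====
-- while n > 0: n, r = divmod(n, 3); three = three + str(r)   (string kept as List Char)
def buildThree (n : Int) (three : List Char) : List Char :=
  if 0 < n then
    buildThree (PySem.Int.floordiv n 3) (three ++ PySem.Int.toChars (PySem.Int.mod n 3))
  else three
termination_by n.toNat
decreasing_by
  rename_i h
  rw [PySem.Int.floordiv_eq_ediv_of_pos (by omega)]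
  omega

def solution (n : Int) : Int :=
  let three := buildThree n []
  let revThree := three.reverse          -- three[::-1]
  -- for i in range(len(three) - 1, -1, -1): answer += 3 ** i * int(revThree[i])
  -- index i is always in range and revThree[i] is always a digit char, so the
  -- pyGetD default and the .getD 0 after int() are never reached.
  (PySem.List.pyRange ((three.length : Int) - 1) (-1) (-1)).foldl
    (fun answer i =>
      answer + 3 ^ i.toNat * ((PySem.Int.ofChars? [PySem.List.pyGetD revThree i ' ']).getD 0))
    0

-- ===== PORT B =====
-- while n > 0: n, r = divmod(n, 3); answer = answer * 3 + r
def hornerLoop (n answer : Int) : Int :=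
  if 0 < n then
    hornerLoop (PySem.Int.floordiv n 3) (answer * 3 + PySem.Int.mod n 3)
  else answer
termination_by n.toNat
decreasing_by
  rename_i h
  rw [PySem.Int.floordiv_eq_ediv_of_pos (by omega)]
  omega

def solution_alt (n : Int) : Int := hornerLoop n 0

-- ===== PRECONDITION & SPEC =====
def Spec_solution (n : Int) (out : Int) : Prop := out = solution_alt n
instance (n : Int) (out : Int) : Decidable (Spec_solution n out) := by unfold Spec_solution; infer_instance

-- ===== CLAIM (what is proved, stated in full; the proofs are below) =====
def Claim_equal_solution : Prop := ∀ (n : Int), Dom_solution n → Spec_solution n (solution n)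

-- ===== LEMMAS AND PROOFS =====

-- the LSB-first base-3 digit list of n (the digits A appends to `three`)
def pvDigits (n : Int) : List Int :=
  if 0 < n then PySem.Int.mod n 3 :: pvDigits (PySem.Int.floordiv n 3) else []
termination_by n.toNat
decreasing_by
  rename_i h
  rw [PySem.Int.floordiv_eq_ediv_of_pos (by omega)]
  omega

def pvChr (d : Int) : Char := Char.ofNat (48 + d.toNat)

theorem pvDigits_bounds (n : Int) : ∀ d ∈ pvDigits n, 0 ≤ d ∧ d < 3 := by
  rw [pvDigits]
  split
  · rename_i h
    intro d hd
    rcases List.mem_cons.mp hd with h1 | h1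
    · subst h1
      rw [PySem.Int.mod_eq_emod_of_pos (by omega)]
      omega
    · exact pvDigits_bounds _ d h1
  · intro d hd; simp at hd
termination_by n.toNat
decreasing_by
  rw [PySem.Int.floordiv_eq_ediv_of_pos (by omega)]
  omega

theorem pv_toChars_digit (d : Int) (h0 : 0 ≤ d) (h3 : d < 3) :
    PySem.Int.toChars d = [pvChr d] := by
  interval_cases d <;> decide

theorem buildThree_append (n : Int) (three : List Char) :
    buildThree n three = three ++ buildThree n [] := by
  by_cases h : 0 < n
  · rw [buildThree, if_pos h]
    conv_rhs => rw [buildThree, if_pos h]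
    rw [buildThree_append (PySem.Int.floordiv n 3)
        (three ++ PySem.Int.toChars (PySem.Int.mod n 3)),
      buildThree_append (PySem.Int.floordiv n 3) ([] ++ PySem.Int.toChars (PySem.Int.mod n 3))]
    simp
  · rw [buildThree, if_neg h]
    conv_rhs => rw [buildThree, if_neg h]
    simp
termination_by n.toNat
decreasing_by
  all_goals rw [PySem.Int.floordiv_eq_ediv_of_pos (by omega)]
  all_goals omega

theorem buildThree_eq_digits (n : Int) :
    buildThree n [] = (pvDigits n).map pvChr := by
  by_cases h : 0 < n
  · have hm : 0 ≤ PySem.Int.mod n 3 ∧ PySem.Int.mod n 3 < 3 := by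
      rw [PySem.Int.mod_eq_emod_of_pos (by omega)]; omega
    rw [buildThree, if_pos h]
    conv_rhs => rw [pvDigits, if_pos h]
    rw [buildThree_append, buildThree_eq_digits (PySem.Int.floordiv n 3),
      pv_toChars_digit _ hm.1 hm.2]
    simp
  · rw [buildThree, if_neg h]
    conv_rhs => rw [pvDigits, if_neg h]
    simp
termination_by n.toNat
decreasing_by
  rw [PySem.Int.floordiv_eq_ediv_of_pos (by omega)]
  omega

theorem hornerLoop_eq (n a : Int) :
    hornerLoop n a = (pvDigits n).foldl (fun acc d => acc * 3 + d) a := by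
  by_cases h : 0 < n
  · rw [hornerLoop, if_pos h]
    conv_rhs => rw [pvDigits, if_pos h]
    exact hornerLoop_eq _ _
  · rw [hornerLoop, if_neg h]
    conv_rhs => rw [pvDigits, if_neg h]
    simp
termination_by n.toNat
decreasing_by
  rw [PySem.Int.floordiv_eq_ediv_of_pos (by omega)]
  omega

-- the weighted sum over the reversed digit list equals the Horner fold
theorem pv_sum_eq_horner (ds : List Int) :
    ((List.range ds.length).map
      (fun i => (3 : Int) ^ i * (ds.reverse[i]?.getD 0))).sum
    = ds.foldl (fun acc d => acc * 3 + d) 0 := by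
  induction ds using List.reverseRecOn with
  | nil => simp
  | append_singleton t d ih =>
    rw [List.foldl_append]
    simp only [List.reverse_append, List.reverse_cons, List.reverse_nil, List.nil_append,
      List.length_append, List.length_cons, List.length_nil]
    rw [List.range_succ_eq_map]
    simp only [List.map_cons, List.map_map, List.sum_cons, Function.comp_def,
      Nat.succ_eq_add_one, List.singleton_append]
    have hmap : ((List.range t.length).map
        (fun i => (3 : Int) ^ (i + 1) * ((d :: t.reverse)[i + 1]?.getD 0))).sum
        = 3 * ((List.range t.length).map
            (fun i => (3 : Int) ^ i * (t.reverse[i]?.getD 0))).sum := by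
      rw [← List.sum_map_mul_left]
      congr 1
      apply List.map_congr_left
      intro i _
      simp [pow_succ]
      ring
    rw [hmap, ih]
    simp
    ring

theorem pv_parse_chr (d : Int) (h0 : 0 ≤ d) (h3 : d < 3) :
    PySem.Int.ofChars? [pvChr d] = some d := by
  interval_cases d <;> decide

theorem solution_eq_alt (n : Int) : solution n = solution_alt n := by
  dsimp only [solution, solution_alt]
  rw [hornerLoop_eq, buildThree_eq_digits]
  set ds := pvDigits n with hds
  have hb := pvDigits_bounds n
  rw [← hds] at hb
  have hlen : ((ds.map pvChr).length : Int) = (ds.length : Int) := by simp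
  rw [hlen]
  rw [PySem.List.pyRange_neg_one_eq_reverse]
  have : (-1 : Int) + 1 = 0 := by norm_num
  rw [this]
  have h1 : (ds.length : Int) - 1 + 1 = (ds.length : Int) := by ring
  rw [h1]
  rw [List.foldl_reverse]
  -- foldr of additions = sum of mapped list
  have hfoldr : ∀ (l : List Int) (g : Int → Int),
      l.foldr (fun i acc => acc + g i) 0 = (l.map g).sum := by
    intro l g
    induction l with
    | nil => simp
    | cons x t ih => simp [ih]; ring
  rw [hfoldr]
  rw [← pv_sum_eq_horner ds]
  rw [show PySem.List.pyRange 0 (ds.length : Int) 1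
        = (List.range ds.length).map (fun k : Nat => (k : Int)) by
      rw [PySem.List.pyRange_one]
      simp]
  rw [List.map_map]
  congr 1
  apply List.map_congr_left
  intro i hi
  simp only [Function.comp, Int.toNat_natCast]
  congr 1
  have hi' : i < ds.length := List.mem_range.mp hi
  have hget : PySem.List.pyGetD ((ds.map pvChr).reverse) (i : Int) ' '
      = pvChr (ds.reverse[i]?.getD 0) := by
    rw [PySem.List.pyGetD_natCast]
    rw [← List.map_reverse]
    have hlt : i < ds.reverse.length := by simpa using hi'
    rw [List.getD_eq_getElem _ _ (by simpa using hlt)]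
    rw [List.getElem_map]
    rw [List.getElem?_eq_getElem hlt]
    simp
  rw [hget]
  have hmem : ds.reverse[i]?.getD 0 ∈ ds := by
    have hlt : i < ds.reverse.length := by simpa using hi'
    rw [List.getElem?_eq_getElem hlt]
    simp only [Option.getD_some]
    exact List.mem_reverse.mp (List.getElem_mem hlt)
  obtain ⟨hl, hr⟩ := hb _ hmem
  rw [pv_parse_chr _ hl hr]
  rfl

-- ===== VERDICT (by name: the statement is the Claim_ definition above) =====
theorem solution_spec : Claim_equal_solution := by
  intro n _
  unfold Spec_solution
  exact solution_eq_alt n
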